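-- pv_equiv track=rewrite | github.com/jurre83/Winc | for/main.py | alphabet_set
-- ===== SOURCE A (Python) =====
-- def alphabet_set(countries):
--     alphabet = ['a', 'b', 'c', 'd', 'e', 'f', 'g', 'h', 'i', 'j', 'k', 'l',
--                 'm', 'n', 'o', 'p', 'q', 'r', 's', 't', 'u', 'v', 'w', 'x',
--                 'y', 'z']
--     countries_abc = []
--     countries_sorted = sorted(countries, key=len, reverse=True)
--     for country in countries_sorted:
--         lowercase_country = country.lower()
--         for char in lowercase_country:
--             if char in alphabet:
--                 alphabet.remove(char)
--                 if country not in countries_abc: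
--                     countries_abc.append(country)
--     return countries_abc
-- ===== SOURCE B (Python) =====
-- def alphabet_set(countries):
--     ordered = sorted(countries, key=len, reverse=True)
--     owners = set()
--     for letter in 'abcdefghijklmnopqrstuvwxyz':
--         for i, country in enumerate(ordered):
--             if letter in country.lower():
--                 owners.add(i)
--                 break
--     return [country for i, country in enumerate(ordered) if i in owners]
-- ===== Notes on version B (the rewrite author's own statement) =====
-- stated objective: alternative
-- what changed: B inverts the iteration: instead of country-major depletion of a mutable alphabet, it scans letter-major — for each of the 26 letters it finds the first (length-sorted) country containing it, collects those owner indices, and returns the countries that own at least one letter; no mutable alphabet and no duplicate guard.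
import Mathlib
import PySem

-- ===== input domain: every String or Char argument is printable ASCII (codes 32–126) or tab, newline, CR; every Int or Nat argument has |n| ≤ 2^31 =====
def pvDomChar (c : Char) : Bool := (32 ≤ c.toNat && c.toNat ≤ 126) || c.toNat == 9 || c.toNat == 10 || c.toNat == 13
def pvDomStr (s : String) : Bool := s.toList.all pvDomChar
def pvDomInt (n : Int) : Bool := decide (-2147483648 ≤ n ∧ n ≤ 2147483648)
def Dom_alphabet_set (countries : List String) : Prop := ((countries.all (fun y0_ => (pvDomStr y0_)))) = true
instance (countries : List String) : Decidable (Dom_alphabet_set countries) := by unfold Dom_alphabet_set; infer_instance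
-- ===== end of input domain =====

-- B replaces A's country-major loop that depletes a mutable alphabet by a letter-major scan:
-- for each letter find the first length-sorted country containing it, then keep exactly the
-- countries owning at least one letter (objective: alternative decomposition, same cost class).

-- ===== PORT A =====
-- body of A's inner `for char in lowercase_country` loop, acting on (alphabet, countries_abc)
def pvCharStep (country : String) (st : List Char × List String) (ch : Char) :
    List Char × List String :=
  if st.1.contains ch then
    -- `alphabet.remove(char)`: remove? is `some` here because the membership test just passed
    let alphabet' := (PySem.List.remove? st.1 ch).getD st.1
    if st.2.contains country then (alphabet', st.2)
    else (alphabet', st.2 ++ [country])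
  else st

-- body of A's outer `for country in countries_sorted` loop
def pvCountryStep (st : List Char × List String) (country : String) :
    List Char × List String :=
  (PySem.Str.lower country).toList.foldl (pvCharStep country) st

def alphabet_set (countries : List String) : List String :=
  let alphabet : List Char := ['a','b','c','d','e','f','g','h','i','j','k','l','m',
                               'n','o','p','q','r','s','t','u','v','w','x','y','z']
  let countries_sorted := PySem.List.sorted countries (fun c => PySem.Str.len c) true
  (countries_sorted.foldl pvCountryStep (alphabet, [])).2

-- ===== PORT B =====
-- B's inner `for i, country in enumerate(ordered): if letter in country.lower(): … break`:
-- first index whose lowercased country contains the letter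
def pvFirstIdx : List (Int × String) → Char → Option Int
  | [], _ => none
  | (i, c) :: rest, letter =>
    if (PySem.Str.lower c).toList.contains letter then some i
    else pvFirstIdx rest letter

def alphabet_set_alt (countries : List String) : List String :=
  let ordered := PySem.List.sorted countries (fun c => PySem.Str.len c) true
  let owners : PySem.Set Int :=
    ("abcdefghijklmnopqrstuvwxyz".toList).foldl
      (fun own letter =>
        match pvFirstIdx (PySem.List.enumerate ordered 0) letter with
        | some i => PySem.Set.add own i
        | none => own)
      PySem.Set.empty
  (PySem.List.enumerate ordered 0).foldl
    (fun acc p => if PySem.Set.contains owners p.1 then acc ++ [p.2] else acc) []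

-- ===== PRECONDITION & SPEC =====
def Spec_alphabet_set (countries : List String) (out : List String) : Prop := out = alphabet_set_alt countries
instance (countries : List String) (out : List String) : Decidable (Spec_alphabet_set countries out) := by unfold Spec_alphabet_set; infer_instance

-- ===== CLAIM (what is proved, stated in full; the proofs are below) =====
def Claim_equal_alphabet_set : Prop := ∀ (countries : List String), Dom_alphabet_set countries → Spec_alphabet_set countries (alphabet_set countries)

-- ===== LEMMAS AND PROOFS =====

-- canonical greedy selection both programs compute
def pvSelect : List Char → List String → List String
  | _, [] => []
  | alph, c :: cs =>
    let l := (PySem.Str.lower c).toList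
    if l.any (fun ch => alph.contains ch)
    then c :: pvSelect (alph.filter (fun ch => !(l.contains ch))) cs
    else pvSelect alph cs

-- A's inner loop in closed form: the alphabet loses every character of the country,
-- and the country is appended iff it contributed a letter and was not yet listed.
theorem pvInner_spec (country : String) (l : List Char) (alph : List Char)
    (abc : List String) (h : alph.Nodup) :
    l.foldl (pvCharStep country) (alph, abc) =
      (alph.filter (fun ch => !(l.contains ch)),
       if l.any (fun ch => alph.contains ch) && !(abc.contains country)
       then abc ++ [country] else abc) := by
  induction l generalizing alph abc with
  | nil => simp
  | cons ch l ih =>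
    by_cases hc : ch ∈ alph
    · have hrem : PySem.List.remove? alph ch = some (alph.erase ch) :=
        PySem.List.remove?_eq_some_erase alph ch hc
      have herase : alph.erase ch = alph.filter (fun x => x != ch) :=
        h.erase_eq_filter ch
      have hfilter : (alph.erase ch).filter (fun x => !(l.contains x)) =
          alph.filter (fun x => !((ch :: l).contains x)) := by
        rw [herase, List.filter_filter]
        apply List.filter_congr
        intro a _
        by_cases hac : a = ch <;> simp [hac]
      by_cases hm : country ∈ abc
      · have : pvCharStep country (alph, abc) ch = (alph.erase ch, abc) := by
          simp [pvCharStep, hc, hrem, hm]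
        rw [List.foldl_cons, this, ih _ _ (h.erase ch), hfilter]
        simp [hm]
      · have : pvCharStep country (alph, abc) ch = (alph.erase ch, abc ++ [country]) := by
          simp [pvCharStep, hc, hrem, hm]
        rw [List.foldl_cons, this, ih _ _ (h.erase ch), hfilter]
        simp [hm, hc]
    · have : pvCharStep country (alph, abc) ch = (alph, abc) := by
        simp [pvCharStep, hc]
      rw [List.foldl_cons, this, ih _ _ h]
      have hfilter : alph.filter (fun x => !(l.contains x)) =
          alph.filter (fun x => !((ch :: l).contains x)) := by
        apply List.filter_congr
        intro a ha
        have : a ≠ ch := fun e => hc (e ▸ ha)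
        simp [this]
      rw [hfilter]
      simp [hc]

-- A's outer loop computes the canonical greedy selection
theorem pvALoop (cs : List String) (alph : List Char) (abc : List String)
    (hn : alph.Nodup)
    (hd : ∀ c ∈ abc, ∀ ch ∈ (PySem.Str.lower c).toList, ch ∉ alph) :
    (cs.foldl pvCountryStep (alph, abc)).2 = abc ++ pvSelect alph cs := by
  induction cs generalizing alph abc with
  | nil => simp [pvSelect]
  | cons c cs ih =>
    set l := (PySem.Str.lower c).toList with hl
    rw [List.foldl_cons]
    have hstep : pvCountryStep (alph, abc) c =
        (alph.filter (fun ch => !(l.contains ch)),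
         if l.any (fun ch => alph.contains ch) && !(abc.contains c)
         then abc ++ [c] else abc) := by
      rw [pvCountryStep, ← hl, pvInner_spec c l alph abc hn]
    by_cases hany : l.any (fun ch => alph.contains ch) = true
    · have hnot : c ∉ abc := by
        simp only [List.any_eq_true] at hany
        obtain ⟨ch, h1, h2⟩ := hany
        intro hin
        exact hd c hin ch h1 (by simpa using h2)
      have hnot' : abc.contains c = false := by simpa using hnot
      rw [hstep]
      simp only [hany, hnot', Bool.not_false, Bool.and_self, if_pos]
      rw [ih _ _ (hn.filter _) ?_]
      · show _ = abc ++ pvSelect alph (c :: cs)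
        rw [pvSelect, ← hl]
        simp only [hany, if_pos, List.append_assoc]
        rfl
      · intro d hdmem ch hch hx
        rw [List.mem_filter] at hx
        rcases List.mem_append.mp hdmem with h' | h'
        · exact hd d h' ch hch hx.1
        · have : d = c := by simpa using h'
          subst this
          rw [← hl] at hch
          simp [hch] at hx
    · have hany' : l.any (fun ch => alph.contains ch) = false := by
        simpa using hany
      rw [hstep]
      simp only [hany', Bool.false_and, Bool.false_eq_true, if_false]
      have hfix : alph.filter (fun ch => !(l.contains ch)) = alph := by
        rw [List.filter_eq_self]
        intro ch hch
        simp only [List.any_eq_false] at hany'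
        by_cases hcl : ch ∈ l
        · exact absurd (by simpa using hch) (by simpa using hany' ch hcl)
        · simpa using hcl
      rw [hfix, ih _ _ hn hd]
      show _ = abc ++ pvSelect alph (c :: cs)
      rw [pvSelect, ← hl]
      simp only [hany', Bool.false_eq_true, if_false]

-- membership in the owners set built by B's letter loop
theorem pvOwners_mem (letters : List Char) (e : List (Int × String))
    (own : PySem.Set Int) (i : Int) :
    (i ∈ letters.foldl
        (fun own letter =>
          match pvFirstIdx e letter with
          | some j => PySem.Set.add own j
          | none => own) own) ↔
      i ∈ own ∨ ∃ l ∈ letters, pvFirstIdx e l = some i := by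
  induction letters generalizing own with
  | nil => simp
  | cons a letters ih =>
    rw [List.foldl_cons, ih]
    rcases h : pvFirstIdx e a with _ | j
    · simp only [List.mem_cons]
      constructor
      · rintro (h1 | h2)
        · exact Or.inl h1
        · obtain ⟨l, hl, he⟩ := h2
          exact Or.inr ⟨l, Or.inr hl, he⟩
      · rintro (h1 | ⟨l, hl | hl, he⟩)
        · exact Or.inl h1
        · subst hl; rw [h] at he; cases he
        · exact Or.inr ⟨l, hl, he⟩
    · rw [PySem.Set.mem_add]
      constructor
      · rintro ((h1 | h1) | h2)
        · exact Or.inl h1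
        · subst h1; exact Or.inr ⟨a, List.mem_cons_self, h⟩
        · obtain ⟨l, hl, he⟩ := h2
          exact Or.inr ⟨l, List.mem_cons_of_mem _ hl, he⟩
      · rintro (h1 | ⟨l, hl, he⟩)
        · exact Or.inl (Or.inl h1)
        · rcases List.mem_cons.mp hl with h' | h'
          · subst h'; rw [h] at he; cases he
            exact Or.inl (Or.inr rfl)
          · exact Or.inr ⟨l, h', he⟩

-- pvFirstIdx only returns indices at or beyond the enumeration start
theorem pvFirstIdx_ge (cs : List String) (s : Int) (l : Char) (i : Int)
    (h : pvFirstIdx (PySem.List.enumerate cs s) l = some i) : s ≤ i := by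
  induction cs generalizing s with
  | nil => simp [PySem.List.enumerate_nil, pvFirstIdx] at h
  | cons c cs ih =>
    rw [PySem.List.enumerate_cons, pvFirstIdx] at h
    split at h
    · cases h; exact le_refl i
    · have := ih (s + 1) h
      omega

-- the owned-index filter over the enumeration IS the greedy selection
theorem pvBridge (cs : List String) (L : List Char) (s : Int) :
    ((PySem.List.enumerate cs s).filter
        (fun p => decide (∃ l ∈ L, pvFirstIdx (PySem.List.enumerate cs s) l = some p.1))).map
      (fun p => p.2) = pvSelect L cs := by
  induction cs generalizing L s with
  | nil => simp [PySem.List.enumerate_nil, pvSelect]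
  | cons c cs ih =>
    rw [PySem.List.enumerate_cons, List.filter_cons]
    set lc := (PySem.Str.lower c).toList with hlc
    -- head predicate: (s, c) kept iff some letter of L is in lc
    have hhead : (∃ l ∈ L, pvFirstIdx ((s, c) :: PySem.List.enumerate cs (s+1)) l = some s)
        ↔ ∃ l ∈ L, l ∈ lc := by
      constructor
      · rintro ⟨l, hl, he⟩
        rw [pvFirstIdx] at he
        split at he
        · exact ⟨l, hl, by simpa [hlc] using ‹(PySem.Str.lower c).toList.contains l = true›⟩
        · exact absurd (pvFirstIdx_ge cs (s+1) l s he) (by omega)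
      · rintro ⟨l, hl, hmem⟩
        refine ⟨l, hl, ?_⟩
        rw [pvFirstIdx, if_pos (by simpa [hlc] using hmem)]
    -- tail predicate rewriting
    have htail : ∀ p ∈ PySem.List.enumerate cs (s+1),
        (decide (∃ l ∈ L, pvFirstIdx ((s, c) :: PySem.List.enumerate cs (s+1)) l = some p.1))
        = decide (∃ l ∈ L.filter (fun ch => !(lc.contains ch)),
            pvFirstIdx (PySem.List.enumerate cs (s+1)) l = some p.1) := by
      intro p hp
      have hp1 : s + 1 ≤ p.1 := by
        rw [PySem.List.mem_enumerate_iff] at hp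
        obtain ⟨k, hk, he⟩ := hp
        subst he
        omega
      rw [decide_eq_decide]
      constructor
      · rintro ⟨l, hl, he⟩
        rw [pvFirstIdx] at he
        split at he
        · cases he; omega
        · refine ⟨l, List.mem_filter.mpr ⟨hl, ?_⟩, he⟩
          simpa [hlc] using ‹¬ (PySem.Str.lower c).toList.contains l = true›
      · rintro ⟨l, hl, he⟩
        rw [List.mem_filter] at hl
        refine ⟨l, hl.1, ?_⟩
        rw [pvFirstIdx, if_neg (by simpa [hlc] using hl.2)]
        exact he
    rw [List.filter_congr htail]
    by_cases hc : ∃ l ∈ L, l ∈ lc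
    · rw [if_pos (by simpa using hhead.mpr hc), List.map_cons, ih]
      rw [pvSelect, ← hlc, if_pos]
      simp only [List.any_eq_true]
      obtain ⟨l, hl, hm⟩ := hc
      exact ⟨l, hm, by simpa using hl⟩
    · rw [if_neg (by simpa using (fun h => hc (hhead.mp h)))]
      have hLeq : L.filter (fun ch => !(lc.contains ch)) = L := by
        rw [List.filter_eq_self]
        intro l hl
        simp only [Bool.not_eq_true', ← Bool.not_eq_true, List.contains_eq_mem, decide_eq_true_eq]
        intro hm
        exact hc ⟨l, hl, by simpa using hm⟩
      rw [hLeq, ih]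
      rw [pvSelect, ← hlc, if_neg]
      simp only [List.any_eq_true, not_exists]
      push Not
      intro l hml hcont
      exact hc ⟨l, by simpa using hcont, hml⟩

-- ===== VERDICT (by name: the statement is the Claim_ definition above) =====
theorem alphabet_set_spec : Claim_equal_alphabet_set := by
  intro countries _
  show alphabet_set countries = alphabet_set_alt countries
  simp only [alphabet_set, alphabet_set_alt]
  set ordered := PySem.List.sorted countries (fun c => PySem.Str.len c) true with hord
  set e := PySem.List.enumerate ordered 0 with he
  set letters := "abcdefghijklmnopqrstuvwxyz".toList with hlet
  set owners : PySem.Set Int :=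
    letters.foldl
      (fun own letter =>
        match pvFirstIdx e letter with
        | some i => PySem.Set.add own i
        | none => own)
      PySem.Set.empty with how
  rw [pvALoop ordered _ [] (by decide) (by intro c hc; simp at hc)]
  have hfold : List.foldl (fun acc p => if PySem.Set.contains owners p.1 then acc ++ [p.2] else acc)
      ([] : List String) e
      = ([] : List String) ++ (e.filter (fun p => PySem.Set.contains owners p.1)).map (fun p => p.2) :=
    PySem.List.foldl_append_if (fun p => PySem.Set.contains owners p.1) (fun p => p.2) e []
  rw [hfold, List.nil_append, List.nil_append]
  have hletters : letters = ['a','b','c','d','e','f','g','h','i','j','k','l','m',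
      'n','o','p','q','r','s','t','u','v','w','x','y','z'] := by decide
  have hpred : ∀ p ∈ e, PySem.Set.contains owners p.1
      = decide (∃ l ∈ letters, pvFirstIdx e l = some p.1) := by
    intro p _
    rw [how]
    rw [show PySem.Set.contains
        (letters.foldl (fun own letter =>
          match pvFirstIdx e letter with
          | some i => PySem.Set.add own i
          | none => own) PySem.Set.empty) p.1
      = decide (p.1 ∈ letters.foldl (fun own letter =>
          match pvFirstIdx e letter with
          | some i => PySem.Set.add own i
          | none => own) PySem.Set.empty) from by
        rw [Bool.eq_iff_iff]
        simp [PySem.Set.contains]]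
    rw [decide_eq_decide]
    rw [pvOwners_mem letters e PySem.Set.empty p.1]
    simp [PySem.Set.empty]
  rw [List.filter_congr hpred, he, pvBridge ordered letters 0, hletters]
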